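-- pv_equiv track=rewrite | github.com/MannLabs/alphakraken | shared/validation.py | validate_config_params
-- ===== SOURCE A (Python) =====
-- SHELL_METACHARACTERS = {    ";", "&", "|", "$", "`", "(", ")", "<", ">", "*", "?", "[", "]", "{", "}", "~", "!", "\\", '"', "'" }
--
-- def validate_config_params(config_params: str) -> list[str]:
--     """Validate config parameters for security (prevent shell injection).
--
--     Returns:
--         tuple[bool, str]: (is_valid, error_message)
--
--     """
--     errors = []
--     if not config_params:
--         return errors  # Empty params are allowed
--
--     # Check for shell metacharacters
--     found_forbidden = []
--     for char in config_params:
--         if char in SHELL_METACHARACTERS: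
--             found_forbidden.append(char)  # noqa: PERF401
--
--     if found_forbidden:
--         unique_forbidden = sorted(set(found_forbidden))
--         error_msg = f"Config parameters contain forbidden shell metacharacters: {', '.join(unique_forbidden)} "
--         errors.append(error_msg)
--
--     return errors
-- ===== SOURCE B (Python) =====
-- SHELL_METACHARACTERS = {    ";", "&", "|", "$", "`", "(", ")", "<", ">", "*", "?", "[", "]", "{", "}", "~", "!", "\\", '"', "'" }
--
-- _SORTED_METACHARACTERS = sorted(SHELL_METACHARACTERS)
--
-- def validate_config_params(config_params: str) -> list[str]:
--     """Validate config parameters for security (prevent shell injection).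
--
--     Instead of scanning the input character by character, iterate over the
--     fixed, pre-sorted metacharacter list and keep those that occur anywhere
--     in the input; the result is already deduplicated and sorted.
--     """
--     found = [c for c in _SORTED_METACHARACTERS if c in config_params]
--     if not found:
--         return []
--     return [
--         f"Config parameters contain forbidden shell metacharacters: {', '.join(found)} "
--     ]
-- ===== Notes on version B (the rewrite author's own statement) =====
-- stated objective: alternative
-- what changed: Inverts the traversal: instead of scanning the input char-by-char, accumulating occurrences and then dedup-sorting them, B iterates over the fixed pre-sorted 20-element metacharacter list and keeps those contained in the input (via substring membership, C-level str 'in'), so the result is produced already unique and sorted with no per-character accumulator, no set() and no sort of input-derived data.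
import Mathlib
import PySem

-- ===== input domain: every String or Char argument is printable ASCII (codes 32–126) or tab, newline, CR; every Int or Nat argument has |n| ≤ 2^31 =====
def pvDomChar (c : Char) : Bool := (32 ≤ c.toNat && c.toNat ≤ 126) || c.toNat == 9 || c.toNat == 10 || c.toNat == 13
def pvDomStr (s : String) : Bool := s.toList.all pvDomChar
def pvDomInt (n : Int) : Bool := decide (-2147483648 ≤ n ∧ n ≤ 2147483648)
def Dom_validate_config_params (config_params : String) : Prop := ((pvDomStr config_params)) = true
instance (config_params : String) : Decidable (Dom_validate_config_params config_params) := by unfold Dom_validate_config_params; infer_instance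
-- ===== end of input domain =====

-- B inverts the traversal: it iterates over the fixed pre-sorted metacharacter list and keeps
-- those contained in the input, so the result is produced already unique and sorted
-- (no per-character accumulator, no set(), no sort of input-derived data).

def SHELL_METACHARACTERS : PySem.Set Char :=
  PySem.Set.ofList [';', '&', '|', '$', '`', '(', ')', '<', '>', '*', '?',
                    '[', ']', '{', '}', '~', '!', '\\', '"', '\'']

def pvErrMsg (uniq : List Char) : String :=
  "Config parameters contain forbidden shell metacharacters: " ++
    PySem.Str.join ", " (uniq.map (fun c => String.ofList [c])) ++ " "

-- ===== PORT A =====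
def validate_config_params (config_params : String) : List String :=
  let errors : List String := []
  if config_params.toList = [] then errors
  else
    let found_forbidden : List Char :=
      config_params.toList.foldl
        (fun acc char =>
          if PySem.Set.contains SHELL_METACHARACTERS char then acc ++ [char] else acc) []
    if found_forbidden.isEmpty then errors
    else
      let unique_forbidden :=
        PySem.List.sorted (PySem.Set.ofList found_forbidden) (fun c => c) false
      errors ++ [pvErrMsg unique_forbidden]

-- ===== PORT B =====
-- sorted(SHELL_METACHARACTERS), a module-level constant in Source B
def SORTED_METACHARACTERS : List Char :=
  ['!', '"', '$', '&', '\'', '(', ')', '*', ';', '<', '>', '?',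
   '[', '\\', ']', '`', '{', '|', '}', '~']

def validate_config_params_alt (config_params : String) : List String :=
  let found :=
    SORTED_METACHARACTERS.filter (fun c => PySem.Str.isIn (String.ofList [c]) config_params)
  if found.isEmpty then []
  else [pvErrMsg found]

-- ===== PRECONDITION & SPEC =====
def Spec_validate_config_params (config_params : String) (out : List String) : Prop := out = validate_config_params_alt config_params
instance (config_params : String) (out : List String) : Decidable (Spec_validate_config_params config_params out) := by unfold Spec_validate_config_params; infer_instance

-- ===== CLAIM (what is proved, stated in full; the proofs are below) =====
def Claim_equal_validate_config_params : Prop := ∀ (config_params : String), Dom_validate_config_params config_params → Spec_validate_config_params config_params (validate_config_params config_params)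

-- ===== LEMMAS AND PROOFS =====

-- 'c in s' for a one-character needle is character membership
lemma isIn_singleton_iff (c : Char) (s : String) :
    PySem.Str.isIn (String.ofList [c]) s = true ↔ c ∈ s.toList := by
  rw [PySem.Str.isIn_iff_infix]
  constructor
  · intro h
    have : (String.ofList [c]).toList = [c] := by simp
    rw [this] at h
    exact (List.singleton_sublist).mp h.sublist
  · intro h
    obtain ⟨l1, l2, hl⟩ := List.append_of_mem h
    have hc : (String.ofList [c]).toList = [c] := by simp
    rw [hc, hl]
    exact ⟨l1, l2, by simp⟩

-- the Python set SHELL_METACHARACTERS and the pre-sorted list have the same members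
lemma mem_meta_iff (a : Char) :
    a ∈ SHELL_METACHARACTERS ↔ a ∈ SORTED_METACHARACTERS := by
  simp only [SHELL_METACHARACTERS, SORTED_METACHARACTERS, PySem.Set.mem_ofList,
    List.mem_cons, List.not_mem_nil, or_false]
  tauto

-- A's dedup-then-sort of the occurrence list equals B's filtered pre-sorted list
lemma sorted_occ_eq_filter_meta (s : String) :
    PySem.List.sorted
      (PySem.Set.ofList (s.toList.filter (fun c => PySem.Set.contains SHELL_METACHARACTERS c)))
      (fun c => c) false
    = SORTED_METACHARACTERS.filter (fun c => PySem.Str.isIn (String.ofList [c]) s) := by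
  apply PySem.List.sorted_eq_of_perm_of_pairwise_lt
  · rw [List.perm_ext_iff_of_nodup
      (List.Nodup.filter _ (by decide))
      (PySem.Set.nodup_ofList _)]
    intro a
    simp only [List.mem_filter, PySem.Set.mem_ofList, isIn_singleton_iff,
      PySem.Set.contains_iff, mem_meta_iff]
    tauto
  · exact List.Pairwise.filter _ (by decide)

-- ===== VERDICT (by name: the statement is the Claim_ definition above) =====
theorem validate_config_params_spec : Claim_equal_validate_config_params := by
  intro s _
  show validate_config_params s = validate_config_params_alt s
  unfold validate_config_params validate_config_params_alt
  simp only [PySem.List.foldl_append_if_eq_filter, List.nil_append]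
  rw [← sorted_occ_eq_filter_meta]
  by_cases he : s.toList.filter (fun c => PySem.Set.contains SHELL_METACHARACTERS c) = []
  · rw [he]
    by_cases hs : s.toList = [] <;>
      simp [hs, PySem.Set.ofList, PySem.List.sorted]
  · have hne : s.toList ≠ [] := by rintro h0; simp [h0] at he
    have hsne : PySem.List.sorted
        (PySem.Set.ofList
          (s.toList.filter (fun c => PySem.Set.contains SHELL_METACHARACTERS c)))
        (fun c => c) false ≠ [] := by
      rw [Ne, PySem.List.sorted_eq_nil_iff]
      intro h0
      obtain ⟨a, ha⟩ := List.exists_mem_of_ne_nil _ he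
      have hm := (PySem.Set.mem_ofList _ a).mpr ha
      rw [h0] at hm
      simp at hm
    simp only [List.isEmpty_iff, if_neg hne, if_neg he, if_neg hsne]
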